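-- pv_equiv track=rewrite | github.com/pwei1018/von-bc-registries-agent | data-pipeline/bcreg/eventprocessor.py | get_corp_active_state
-- ===== SOURCE A (Python) =====
-- def get_corp_active_state(corp_info):
--     ret_corp_state = None
--     for corp_state in corp_info['corp_state']:
--         if corp_state['end_event_id'] is None:
--             return corp_state
--         elif ret_corp_state is None:
--             ret_corp_state = corp_state
--         elif corp_state['effective_start_date'] > ret_corp_state['effective_start_date']:
--             ret_corp_state = corp_state
--     return ret_corp_state
-- ===== SOURCE B (Python) =====
-- def get_corp_active_state(corp_info):
--     states = corp_info['corp_state']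
--     active = next((cs for cs in states if cs['end_event_id'] is None), None)
--     if active is not None:
--         return active
--     best = None
--     for cs in states:
--         if best is None or cs['effective_start_date'] > best['effective_start_date']:
--             best = cs
--     return best
-- ===== Notes on version B (the rewrite author's own statement) =====
-- stated objective: idiomatic
-- what changed: A's single fused accumulator loop with three-way branching is split into two phases: next() over a generator returns the first corp_state whose end_event_id is None, and otherwise a plain argmax pass over effective_start_date (strict >, so first-maximal wins) reproduces A's tie-breaking, short-circuiting so a lone state's date is never read, exactly as in A.
import Mathlib
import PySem

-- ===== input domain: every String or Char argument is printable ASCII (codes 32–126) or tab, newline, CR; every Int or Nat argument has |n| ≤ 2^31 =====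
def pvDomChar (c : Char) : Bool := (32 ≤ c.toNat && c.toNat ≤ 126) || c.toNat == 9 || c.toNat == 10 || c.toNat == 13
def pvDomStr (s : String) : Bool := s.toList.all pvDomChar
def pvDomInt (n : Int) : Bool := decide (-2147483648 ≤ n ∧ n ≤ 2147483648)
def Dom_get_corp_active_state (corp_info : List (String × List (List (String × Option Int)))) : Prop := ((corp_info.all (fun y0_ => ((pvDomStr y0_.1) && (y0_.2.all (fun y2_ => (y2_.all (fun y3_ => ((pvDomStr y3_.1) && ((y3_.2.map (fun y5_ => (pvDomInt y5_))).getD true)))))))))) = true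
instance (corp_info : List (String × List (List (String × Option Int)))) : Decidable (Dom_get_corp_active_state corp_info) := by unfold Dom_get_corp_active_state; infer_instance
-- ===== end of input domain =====

-- B replaces A's single fused accumulator loop by two phases (first end_event_id-None state via next(),
-- else a plain argmax pass over effective_start_date); equivalence of the RETURN values is proved on Pre_.

-- ===== PORT A =====
-- corp_state['end_event_id'] (none = KeyError, some none = the value None)
def pvEnd (cs : List (String × Option Int)) : Option (Option Int) :=
  PySem.Dict.get? ⟨cs⟩ "end_event_id"
-- corp_state['effective_start_date'] raw lookup
def pvEsdRaw (cs : List (String × Option Int)) : Option (Option Int) :=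
  PySem.Dict.get? ⟨cs⟩ "effective_start_date"
-- the int value compared by '>'; missing/None dates (where Python raises) are excluded by Pre_, default 0 there
def pvEsd (cs : List (String × Option Int)) : Int :=
  ((pvEsdRaw cs).getD none).getD 0

-- A's for-loop over corp_info['corp_state'] with accumulator ret_corp_state
def pvLoopA : List (List (String × Option Int)) → Option (List (String × Option Int)) → Option (List (String × Option Int))
  | [], ret => ret
  | cs :: rest, ret =>
    if pvEnd cs = some none then some cs
    else
      match ret with
      | none => pvLoopA rest (some cs)
      | some r => if pvEsd r < pvEsd cs then pvLoopA rest (some cs) else pvLoopA rest (some r)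

def get_corp_active_state (corp_info : List (String × List (List (String × Option Int)))) : Option (List (String × Option Int)) :=
  match PySem.Dict.get? ⟨corp_info⟩ "corp_state" with
  | none => none   -- Python raises KeyError; excluded by Pre_
  | some states => pvLoopA states none

-- ===== PORT B =====
def get_corp_active_state_alt (corp_info : List (String × List (List (String × Option Int)))) : Option (List (String × Option Int)) :=
  match PySem.Dict.get? ⟨corp_info⟩ "corp_state" with
  | none => none   -- Python raises KeyError; excluded by Pre_
  | some states =>
    -- active = next((cs for cs in states if cs['end_event_id'] is None), None)
    match states.find? (fun cs => decide (pvEnd cs = some none)) with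
    | some active => some active
    | none =>
      -- the argmax for-loop: best = None; best := cs when best is None or cs date > best date
      states.foldl
        (fun best cs => match best with
          | none => some cs
          | some b => if pvEsd b < pvEsd cs then some cs else some b) none

-- ===== PRECONDITION & SPEC =====
-- true iff the date value is an int (present and not None)
def pvIsIntDate (cs : List (String × Option Int)) : Bool :=
  match pvEsdRaw cs with
  | some (some _) => true
  | _ => false

-- Exactly the inputs on which Python A returns (anywhere else it raises KeyError/TypeError):
-- the 'corp_state' key is present; every state A visits (the prefix V before the first
-- end_event_id-None state) has an 'end_event_id' key; and when A compares dates (2 ≤ |V|)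
-- every visited effective_start_date is an int.
def pvPreB (corp_info : List (String × List (List (String × Option Int)))) : Bool :=
  match PySem.Dict.get? ⟨corp_info⟩ "corp_state" with
  | none => false
  | some states =>
    let V := states.takeWhile (fun cs => !decide (pvEnd cs = some none))
    V.all (fun cs => (pvEnd cs).isSome) &&
    (decide (V.length < 2) || V.all pvIsIntDate)

def Pre_get_corp_active_state (corp_info : List (String × List (List (String × Option Int)))) : Prop :=
  pvPreB corp_info = true
instance (corp_info : List (String × List (List (String × Option Int)))) : Decidable (Pre_get_corp_active_state corp_info) := by unfold Pre_get_corp_active_state; infer_instance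

def pvWitness_get_corp_active_state : (List (String × List (List (String × Option Int)))) :=
  [("corp_state", [[("end_event_id", some 3), ("effective_start_date", some 5)],
                   [("end_event_id", none), ("effective_start_date", some 9)]])]

def Spec_get_corp_active_state (corp_info : List (String × List (List (String × Option Int)))) (out : Option (List (String × Option Int))) : Prop := out = get_corp_active_state_alt corp_info
instance (corp_info : List (String × List (List (String × Option Int)))) (out : Option (List (String × Option Int))) : Decidable (Spec_get_corp_active_state corp_info out) := by unfold Spec_get_corp_active_state; infer_instance

-- ===== CLAIM (what is proved, stated in full; the proofs are below) =====
def Claim_equal_get_corp_active_state : Prop := ∀ (corp_info : List (String × List (List (String × Option Int)))), Dom_get_corp_active_state corp_info → Pre_get_corp_active_state corp_info → Spec_get_corp_active_state corp_info (get_corp_active_state corp_info)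
-- ===== LEMMAS AND PROOFS =====
-- If some visited state has end_event_id None, A's loop early-returns the first such state,
-- whatever the accumulator holds.
theorem pvLoopA_of_find?_eq_some (states : List (List (String × Option Int)))
    (acc : Option (List (String × Option Int))) (active : List (String × Option Int))
    (h : states.find? (fun cs => decide (pvEnd cs = some none)) = some active) :
    pvLoopA states acc = some active := by
  induction states generalizing acc with
  | nil => simp at h
  | cons cs rest ih =>
    by_cases hc : pvEnd cs = some none
    · rw [List.find?_cons_of_pos (by simp [hc])] at h
      simp only [Option.some.injEq] at h
      subst h
      simp [pvLoopA, hc]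
    · rw [List.find?_cons_of_neg (by simp [hc])] at h
      cases acc with
      | none => simpa [pvLoopA, hc] using ih (some cs) h
      | some r =>
        simp only [pvLoopA, if_neg hc]
        split <;> exact ih _ h

-- If no visited state has end_event_id None, A's loop is exactly B's argmax fold.
theorem pvLoopA_of_find?_eq_none (states : List (List (String × Option Int)))
    (acc : Option (List (String × Option Int)))
    (h : states.find? (fun cs => decide (pvEnd cs = some none)) = none) :
    pvLoopA states acc = states.foldl
      (fun a x => match a with
        | none => some x
        | some m => if pvEsd m < pvEsd x then some x else some m) acc := by
  induction states generalizing acc with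
  | nil => rfl
  | cons cs rest ih =>
    have hend : ¬(pvEnd cs = some none) := by
      intro hc
      have := List.find?_eq_none.mp h cs List.mem_cons_self
      simp [hc] at this
    rw [List.find?_cons_of_neg (by simp [hend])] at h
    cases acc with
    | none => simpa [pvLoopA, hend, List.foldl_cons] using ih (some cs) h
    | some r =>
      simp only [pvLoopA, if_neg hend, List.foldl_cons]
      split <;> exact ih _ h

-- ===== VERDICT (by name: the statements are the Claim_ definitions above) =====
theorem get_corp_active_state_spec : Claim_equal_get_corp_active_state := by
  intro corp_info _ _
  unfold Spec_get_corp_active_state get_corp_active_state get_corp_active_state_alt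
  cases hkey : PySem.Dict.get? (⟨corp_info⟩ : PySem.Dict String (List (List (String × Option Int)))) "corp_state" with
  | none => rfl
  | some states =>
    dsimp only
    cases hf : states.find? (fun cs => decide (pvEnd cs = some none)) with
    | some active =>
      dsimp only
      exact pvLoopA_of_find?_eq_some states none active hf
    | none =>
      dsimp only
      exact pvLoopA_of_find?_eq_none states none hf
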